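-- pv_equiv track=rewrite | github.com/nrodriguezm/rupe | pipeline/jobs/run_rupe_ingest.py | pick_latest
-- ===== SOURCE A (Python) =====
-- def pick_latest(resources: list[dict]) -> dict | None:
--     if not resources:
--         return None
--
--     def score(res: dict) -> tuple[int, str]:
--         name = (res.get("name") or "").lower()
--         month_weight = 1 if any(m in name for m in ["enero", "febrero", "marzo", "abril", "mayo", "junio", "julio", "agosto", "setiembre", "septiembre", "octubre", "noviembre", "diciembre"]) else 0
--         lm = res.get("last_modified") or ""
--         return (month_weight, lm)
--
--     return sorted(resources, key=score, reverse=True)[0]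
-- ===== SOURCE B (Python) =====
-- MONTHS = ("enero", "febrero", "marzo", "abril", "mayo", "junio", "julio",
--           "agosto", "setiembre", "septiembre", "octubre", "noviembre", "diciembre")
--
--
-- def _lm(r: dict) -> str:
--     return r.get("last_modified") or ""
--
--
-- def pick_latest(resources: list[dict]) -> dict | None:
--     best_month = None
--     best_all = None
--     for r in resources:
--         if best_all is None or _lm(r) > _lm(best_all):
--             best_all = r
--         name = (r.get("name") or "").lower()
--         if any(m in name for m in MONTHS):
--             if best_month is None or _lm(r) > _lm(best_month):
--                 best_month = r
--     return best_month if best_month is not None else best_all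
-- ===== Notes on version B (the rewrite author's own statement) =====
-- stated objective: alternative
-- what changed: A reverse-sorts all resources by the composite (month-weight, last_modified) key and takes the first element; B makes one linear pass carrying two running first-maxima by last_modified (best month-named resource and best overall) and returns the month-named one if it exists.
import Mathlib
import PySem

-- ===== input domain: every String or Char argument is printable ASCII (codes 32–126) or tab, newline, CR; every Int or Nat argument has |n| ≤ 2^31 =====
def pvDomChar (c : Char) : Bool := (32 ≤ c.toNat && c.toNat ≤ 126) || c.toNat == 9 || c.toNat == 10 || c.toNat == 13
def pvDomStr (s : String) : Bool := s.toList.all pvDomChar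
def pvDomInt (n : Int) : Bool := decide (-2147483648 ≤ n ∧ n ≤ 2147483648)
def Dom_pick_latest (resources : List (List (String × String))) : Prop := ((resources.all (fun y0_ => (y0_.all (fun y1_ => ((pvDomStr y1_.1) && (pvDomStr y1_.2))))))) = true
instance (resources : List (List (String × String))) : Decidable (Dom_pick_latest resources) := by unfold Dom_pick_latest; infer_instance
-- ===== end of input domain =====

-- B replaces A's reverse sort by the composite (month-weight, last_modified) key with a
-- single linear pass carrying two running first-maxima (best month-named, best overall).

-- ===== PORT A =====
def pvMonthsA : List String :=
  ["enero", "febrero", "marzo", "abril", "mayo", "junio", "julio", "agosto",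
   "setiembre", "septiembre", "octubre", "noviembre", "diciembre"]

-- score(res).0 : month_weight
def pvScore1 (res : List (String × String)) : Int :=
  let name := PySem.Str.lower (((PySem.Dict.mk res).get? "name").getD "")
  if pvMonthsA.any (fun m => PySem.Str.isIn m name) then 1 else 0

-- score(res).1 : lm
def pvScore2 (res : List (String × String)) : String :=
  ((PySem.Dict.mk res).get? "last_modified").getD ""

def pick_latest (resources : List (List (String × String))) : Option (List (String × String)) :=
  if resources = [] then none
  else PySem.List.pyGet? (PySem.List.sorted2 resources pvScore1 pvScore2 true) 0

-- ===== PORT B =====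
-- the Python tuple MONTHS
def pvMonthsB : List String :=
  ["enero", "febrero", "marzo", "abril", "mayo", "junio", "julio", "agosto",
   "setiembre", "septiembre", "octubre", "noviembre", "diciembre"]

-- _lm(r)
def pvLm (r : List (String × String)) : String :=
  ((PySem.Dict.mk r).get? "last_modified").getD ""

-- the for-loop of Source B: one pass updating (best_month, best_all)
def pickGo : List (List (String × String)) →
    Option (List (String × String)) → Option (List (String × String)) →
    Option (List (String × String))
  | [], best_month, best_all =>
      match best_month with
      | some b => some b
      | none => best_all
  | r :: rest, best_month, best_all =>
      let best_all' :=
        match best_all with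
        | none => some r
        | some b => if pvLm b < pvLm r then some r else some b
      let name := PySem.Str.lower (((PySem.Dict.mk r).get? "name").getD "")
      let best_month' :=
        if pvMonthsB.any (fun m => PySem.Str.isIn m name) then
          match best_month with
          | none => some r
          | some b => if pvLm b < pvLm r then some r else some b
        else best_month
      pickGo rest best_month' best_all'

def pick_latest_alt (resources : List (List (String × String))) : Option (List (String × String)) :=
  pickGo resources none none

-- ===== PRECONDITION & SPEC =====
def Spec_pick_latest (resources : List (List (String × String))) (out : Option (List (String × String))) : Prop := out = pick_latest_alt resources
instance (resources : List (List (String × String))) (out : Option (List (String × String))) : Decidable (Spec_pick_latest resources out) := by unfold Spec_pick_latest; infer_instance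

-- ===== CLAIM (what is proved, stated in full; the proofs are below) =====
def Claim_equal_pick_latest : Prop := ∀ (resources : List (List (String × String))), Dom_pick_latest resources → Spec_pick_latest resources (pick_latest resources)

-- ===== LEMMAS AND PROOFS =====

-- the month test shared by both analyses
def pvHasMonth (r : List (String × String)) : Bool :=
  pvMonthsB.any (fun m =>
    PySem.Str.isIn m (PySem.Str.lower (((PySem.Dict.mk r).get? "name").getD "")))

-- sorted2's reverse insertion predicate: x goes before m iff m is strictly lex-smaller
def pvBefore (x m : List (String × String)) : Bool :=
  decide (pvScore1 m < pvScore1 x) ||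
    (!decide (pvScore1 x < pvScore1 m) && decide (pvScore2 m < pvScore2 x))

-- A's fold step on the running first maximum under the lexicographic (score1, score2) key
def pvStepA (o : Option (List (String × String))) (x : List (String × String)) :
    Option (List (String × String)) :=
  match o with
  | none => some x
  | some m => if pvBefore x m then some x else some m

-- the "keep first maximum by last_modified" step
def pvStepB (o : Option (List (String × String))) (x : List (String × String)) :
    Option (List (String × String)) :=
  match o with
  | none => some x
  | some m => if pvLm m < pvLm x then some x else some m

theorem pvScore2_eq_lm (r : List (String × String)) : pvScore2 r = pvLm r := rfl

theorem pvScore1_eq (r : List (String × String)) :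
    pvScore1 r = if pvHasMonth r then (1 : Int) else 0 := by
  have h : pvMonthsB = pvMonthsA := rfl
  simp [pvScore1, pvHasMonth, h]

theorem pvStepA_some (m x : List (String × String)) :
    pvStepA (some m) x =
      if pvHasMonth m = pvHasMonth x then (if pvLm m < pvLm x then some x else some m)
      else if pvHasMonth x then some x else some m := by
  simp only [pvStepA, pvBefore, pvScore1_eq, pvScore2_eq_lm]
  cases hm : pvHasMonth m <;> cases hx : pvHasMonth x <;> simp

-- the head of A's reverse insertion sort is the fold of the "keep first maximum" step
theorem pvHead_foldl_insertBy :
    ∀ (xs acc : List (List (String × String))),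
      (xs.foldl (fun a x => PySem.List.insertBy pvBefore x a) acc).head? =
        xs.foldl pvStepA acc.head? := by
  intro xs
  induction xs with
  | nil => intro acc; rfl
  | cons x t ih =>
      intro acc
      have hhead : (PySem.List.insertBy pvBefore x acc).head? = pvStepA acc.head? x := by
        cases acc with
        | nil => rfl
        | cons y ys =>
            simp only [PySem.List.insertBy, List.head?, pvStepA]
            by_cases h : pvBefore x y = true <;> simp [h]
      simp only [List.foldl_cons, ih, hhead]

-- while the running maximum is in the month group, non-month elements never replace it
theorem pvFoldA_of_month :
    ∀ (xs : List (List (String × String))) (m : List (String × String)),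
      pvHasMonth m = true →
      xs.foldl pvStepA (some m) = (xs.filter pvHasMonth).foldl pvStepB (some m) := by
  intro xs
  induction xs with
  | nil => intro m _; rfl
  | cons x t ih =>
      intro m hm
      by_cases hx : pvHasMonth x = true
      · have hstep : pvStepA (some m) x = if pvLm m < pvLm x then some x else some m := by
          rw [pvStepA_some, hm, hx]; simp
        by_cases hlt : pvLm m < pvLm x <;>
          simp only [List.foldl_cons, List.filter_cons, hx, hstep, hlt, if_pos,
            ite_false, pvStepB] <;>
          [exact ih x hx; exact ih m hm]
      · have hx' : pvHasMonth x = false := by simpa using hx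
        have hstep : pvStepA (some m) x = some m := by
          rw [pvStepA_some, hm, hx']; simp
        simp only [List.foldl_cons, List.filter_cons, hx', hstep, Bool.false_eq_true, ite_false]
        exact ih m hm

-- before any month element has been seen, A's fold restarts at the first month element
theorem pvFoldA_of_not_month :
    ∀ (xs : List (List (String × String))) (m : List (String × String)),
      pvHasMonth m = false →
      xs.foldl pvStepA (some m) =
        if xs.filter pvHasMonth = [] then xs.foldl pvStepB (some m)
        else (xs.filter pvHasMonth).foldl pvStepB none := by
  intro xs
  induction xs with
  | nil => intro m _; rfl
  | cons x t ih =>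
      intro m hm
      by_cases hx : pvHasMonth x = true
      · have hstep : pvStepA (some m) x = some x := by
          rw [pvStepA_some, hm, hx]; simp
        simp only [List.foldl_cons, List.filter_cons, hx, ite_true, hstep]
        rw [pvFoldA_of_month t x hx]
        simp [pvStepB]
      · have hx' : pvHasMonth x = false := by simpa using hx
        have hstep : pvStepA (some m) x = if pvLm m < pvLm x then some x else some m := by
          rw [pvStepA_some, hm, hx']; simp
        simp only [List.foldl_cons, List.filter_cons, hx', Bool.false_eq_true, ite_false, hstep]
        by_cases hlt : pvLm m < pvLm x
        · simp only [hlt, ite_true]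
          rw [ih x hx']
          simp [pvStepB, hlt]
        · simp only [hlt, ite_false]
          rw [ih m hm]
          simp [pvStepB, hlt]

-- a pvStepB fold started from some value stays some
theorem pvFoldB_isSome :
    ∀ (xs : List (List (String × String))) (m : List (String × String)),
      (xs.foldl pvStepB (some m)).isSome = true := by
  intro xs
  induction xs with
  | nil => intro m; rfl
  | cons x t ih =>
      intro m
      simp only [List.foldl_cons, pvStepB]
      by_cases h : pvLm m < pvLm x <;> simp [h, ih]

-- B's one-pass loop computed as two pvStepB folds: over the month group and over all
theorem pickGo_eq :
    ∀ (xs : List (List (String × String))) (bm ba : Option (List (String × String))),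
      pickGo xs bm ba =
        match (xs.filter pvHasMonth).foldl pvStepB bm with
        | some b => some b
        | none => xs.foldl pvStepB ba := by
  intro xs
  induction xs with
  | nil => intro bm ba; rfl
  | cons x t ih =>
      intro bm ba
      simp only [pickGo, List.foldl_cons, List.filter_cons]
      by_cases hx : pvHasMonth x = true
      · have hx' : (pvMonthsB.any (fun m =>
            PySem.Str.isIn m (PySem.Str.lower (((PySem.Dict.mk x).get? "name").getD "")))) = true := hx
        simp only [hx, hx', ite_true, List.foldl_cons]
        rw [ih]
        rfl
      · have hx0 : pvHasMonth x = false := by simpa using hx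
        have hx' : (pvMonthsB.any (fun m =>
            PySem.Str.isIn m (PySem.Str.lower (((PySem.Dict.mk x).get? "name").getD "")))) = false := hx0
        simp only [hx0, hx', Bool.false_eq_true, ite_false]
        rw [ih]
        rfl

-- ===== VERDICT (by name: the statement is the Claim_ definition above) =====
theorem pick_latest_spec : Claim_equal_pick_latest := by
  intro resources _
  unfold Spec_pick_latest pick_latest pick_latest_alt
  cases resources with
  | nil => rfl
  | cons r rs =>
      simp only [reduceCtorEq, ite_false]
      -- A's side: the head of the reverse sort as a fold of pvStepA
      have h0 : ∀ (l : List (List (String × String))),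
          PySem.List.pyGet? l 0 = l.head? := by
        intro l; cases l <;> simp [PySem.List.pyGet?, PySem.List.pyIdx?]
      have hfun : PySem.List.sorted2 (r :: rs) pvScore1 pvScore2 true =
          (r :: rs).foldl (fun a x => PySem.List.insertBy pvBefore x a) [] := rfl
      rw [h0, hfun, pvHead_foldl_insertBy (r :: rs) []]
      -- B's side: the one-pass loop as a match on the month-group fold
      rw [pickGo_eq]
      simp only [List.head?_nil, List.foldl_cons, pvStepA]
      by_cases hr : pvHasMonth r = true
      · -- the head is a month resource: the month group is nonempty and starts with r
        rw [pvFoldA_of_month rs r hr]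
        have hfil : (r :: rs).filter pvHasMonth = r :: rs.filter pvHasMonth := by
          simp [hr]
        rw [hfil]
        simp only [List.foldl_cons, pvStepB]
        obtain ⟨b, hb⟩ := Option.isSome_iff_exists.mp
          (pvFoldB_isSome (rs.filter pvHasMonth) r)
        rw [hb]
      · have hr' : pvHasMonth r = false := by simpa using hr
        rw [pvFoldA_of_not_month rs r hr']
        have hfil : (r :: rs).filter pvHasMonth = rs.filter pvHasMonth := by
          simp [hr']
        rw [hfil]
        by_cases hemp : rs.filter pvHasMonth = []
        · simp [hemp, pvStepB]
        · obtain ⟨y, ys, hys⟩ := List.exists_cons_of_ne_nil hemp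
          rw [hys]
          simp only [List.foldl_cons, pvStepB]
          obtain ⟨b, hb⟩ := Option.isSome_iff_exists.mp (pvFoldB_isSome ys y)
          rw [hb]
          simp
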